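-- pv_equiv track=rewrite | github.com/vtkrishn/aoc-2015 | advent_3/advent_3.py | part_1
-- ===== SOURCE A (Python) =====
-- def part_1(data):
--     s = set()
--     horizontal, vertical = 0, 0
--     for i in ''.join(data):
--         if i == '^':
--             vertical += 1
--         elif i == 'v':
--             vertical -= 1
--         elif i == '>':
--             horizontal += 1
--         elif i == '<':
--             horizontal -= 1
--
--         position = (horizontal, vertical)
--         s.add(position)
--     return list(s)
-- ===== SOURCE B (Python) =====
-- def part_1(data):
--     deltas = {'^': (0, 1), 'v': (0, -1), '>': (1, 0), '<': (-1, 0)}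
--
--     def trail(seg):
--         # positions visited while reading seg, RELATIVE to seg's start,
--         # plus seg's net displacement; divide and conquer with a
--         # translation of the right half's trail at the merge.
--         n = len(seg)
--         if n == 0:
--             return [], (0, 0)
--         if n == 1:
--             d = deltas.get(seg[0], (0, 0))
--             return [d], d
--         k = n // 2
--         left, (lx, ly) = trail(seg[:k])
--         right, (rx, ry) = trail(seg[k:])
--         return left + [(lx + px, ly + py) for (px, py) in right], (lx + rx, ly + ry)
--
--     positions, _ = trail(''.join(data))
--     return list(set(positions))
-- ===== Notes on version B (the rewrite author's own statement) =====
-- stated objective: alternative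
-- what changed: Replaces A's single left-to-right accumulating scan with a divide-and-conquer recursion: each half's trail is computed relative to its own start together with its net displacement, the right half's trail is translated by the left half's displacement at the merge, and deduplication happens once at the end.
import Mathlib
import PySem

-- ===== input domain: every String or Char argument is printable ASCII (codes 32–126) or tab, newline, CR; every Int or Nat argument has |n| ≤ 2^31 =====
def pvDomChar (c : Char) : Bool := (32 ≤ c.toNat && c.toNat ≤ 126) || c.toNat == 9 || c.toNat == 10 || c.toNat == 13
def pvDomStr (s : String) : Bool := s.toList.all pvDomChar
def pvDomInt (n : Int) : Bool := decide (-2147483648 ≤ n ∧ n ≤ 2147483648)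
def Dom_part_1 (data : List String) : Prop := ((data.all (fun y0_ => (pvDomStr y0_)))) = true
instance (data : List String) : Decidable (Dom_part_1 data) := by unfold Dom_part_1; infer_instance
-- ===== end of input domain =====

-- B replaces A's single left-to-right accumulating scan by divide and conquer: each half's
-- trail is computed relative to its own start together with its net displacement, and the
-- right half's trail is translated by the left half's displacement at the merge (alternative).

-- ===== PORT A =====
def part_1 (data : List String) : List (Int × Int) :=
  (((PySem.Str.join "" data).toList.foldl
    (fun (st : PySem.Set (Int × Int) × Int × Int) i =>
      let horizontal := st.2.1
      let vertical := st.2.2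
      let hv : Int × Int :=
        if i = '^' then (horizontal, vertical + 1)
        else if i = 'v' then (horizontal, vertical - 1)
        else if i = '>' then (horizontal + 1, vertical)
        else if i = '<' then (horizontal - 1, vertical)
        else (horizontal, vertical)
      (PySem.Set.add st.1 hv, hv))
    (PySem.Set.empty, (0, 0)))).1

-- ===== PORT B =====
def pvDeltas : PySem.Dict Char (Int × Int) :=
  PySem.Dict.mk [('^', (0, 1)), ('v', (0, -1)), ('>', (1, 0)), ('<', (-1, 0))]

-- Source B's recursive helper `trail` (structural recursion on a fuel = the segment length,
-- a pure totality device; the algorithm is Source B's divide and conquer):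
-- (positions relative to the segment's start, net displacement)
def pvTrailBF : Nat → List Char → List (Int × Int) × (Int × Int)
  | _, [] => ([], (0, 0))
  | _, [c] =>
    let d := pvDeltas.getD c (0, 0)
    ([d], d)
  | 0, _ => ([], (0, 0))  -- never reached when fuel ≥ length
  | f + 1, a :: b :: rest =>
    let seg := a :: b :: rest
    let k := seg.length / 2
    let L := pvTrailBF f (seg.take k)
    let R := pvTrailBF f (seg.drop k)
    (L.1 ++ R.1.map (fun p => (L.2.1 + p.1, L.2.2 + p.2)), (L.2.1 + R.2.1, L.2.2 + R.2.2))

def part_1_alt (data : List String) : List (Int × Int) :=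
  let s := (PySem.Str.join "" data).toList
  PySem.Set.ofList (pvTrailBF s.length s).1

-- ===== PRECONDITION & SPEC =====
def Spec_part_1 (data : List String) (out : List (Int × Int)) : Prop := out = part_1_alt data
instance (data : List String) (out : List (Int × Int)) : Decidable (Spec_part_1 data out) := by unfold Spec_part_1; infer_instance

-- ===== CLAIM (what is proved, stated in full; the proofs are below) =====
def Claim_equal_part_1 : Prop := ∀ (data : List String), Dom_part_1 data → Spec_part_1 data (part_1 data)

-- ===== LEMMAS AND PROOFS =====

-- the list of positions visited, starting just after position p, reading characters (A's trail)
def pvTrail (p : Int × Int) : List Char → List (Int × Int)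
  | [] => []
  | c :: cs =>
    let q := (p.1 + (pvDeltas.getD c (0, 0)).1, p.2 + (pvDeltas.getD c (0, 0)).2)
    q :: pvTrail q cs

-- net displacement of a character list
def pvDisp : List Char → Int × Int
  | [] => (0, 0)
  | c :: cs =>
    let d := pvDeltas.getD c (0, 0)
    (d.1 + (pvDisp cs).1, d.2 + (pvDisp cs).2)

theorem pv_step_eq (p : Int × Int) (c : Char) :
    (if c = '^' then (p.1, p.2 + 1)
     else if c = 'v' then (p.1, p.2 - 1)
     else if c = '>' then (p.1 + 1, p.2)
     else if c = '<' then (p.1 - 1, p.2)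
     else (p.1, p.2)) =
    (p.1 + (pvDeltas.getD c (0, 0)).1, p.2 + (pvDeltas.getD c (0, 0)).2) := by
  split_ifs with h1 h2 h3 h4
  · simp [pvDeltas, PySem.Dict.getD_eq_get?_getD, PySem.Dict.get?_mk_cons, *]
  · simp [pvDeltas, PySem.Dict.getD_eq_get?_getD, PySem.Dict.get?_mk_cons, *]; omega
  · simp [pvDeltas, PySem.Dict.getD_eq_get?_getD, PySem.Dict.get?_mk_cons, *]
  · simp [pvDeltas, PySem.Dict.getD_eq_get?_getD, PySem.Dict.get?_mk_cons, *]; omega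
  · simp [pvDeltas, PySem.Dict.getD_eq_get?_getD, PySem.Dict.get?, List.find?,
      beq_eq_false_iff_ne.mpr (Ne.symm h1), beq_eq_false_iff_ne.mpr (Ne.symm h2),
      beq_eq_false_iff_ne.mpr (Ne.symm h3), beq_eq_false_iff_ne.mpr (Ne.symm h4)]

theorem pv_foldA_eq (cs : List Char) (s : PySem.Set (Int × Int)) (p : Int × Int) :
    (cs.foldl
      (fun (st : PySem.Set (Int × Int) × Int × Int) i =>
        let horizontal := st.2.1
        let vertical := st.2.2
        let hv : Int × Int :=
          if i = '^' then (horizontal, vertical + 1)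
          else if i = 'v' then (horizontal, vertical - 1)
          else if i = '>' then (horizontal + 1, vertical)
          else if i = '<' then (horizontal - 1, vertical)
          else (horizontal, vertical)
        (PySem.Set.add st.1 hv, hv))
      (s, p)).1 = PySem.Set.update s (pvTrail p cs) := by
  induction cs generalizing s p with
  | nil => simp [pvTrail, PySem.Set.update]
  | cons c cs ih =>
    simp only [List.foldl_cons, pvTrail]
    rw [pv_step_eq p c, ih, PySem.Set.update_cons]

-- translation invariance of A's trail
theorem pv_trail_shift (cs : List Char) (p q : Int × Int) :
    pvTrail (p.1 + q.1, p.2 + q.2) cs =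
      (pvTrail q cs).map (fun r => (p.1 + r.1, p.2 + r.2)) := by
  induction cs generalizing q with
  | nil => simp [pvTrail]
  | cons c cs ih =>
    simp only [pvTrail, List.map_cons, add_assoc]
    have h := ih (q.1 + (pvDeltas.getD c (0, 0)).1, q.2 + (pvDeltas.getD c (0, 0)).2)
    simp only [] at h
    exact congrArg _ h

theorem pv_trail_append (l r : List Char) (p : Int × Int) :
    pvTrail p (l ++ r) =
      pvTrail p l ++ pvTrail (p.1 + (pvDisp l).1, p.2 + (pvDisp l).2) r := by
  induction l generalizing p with
  | nil => simp [pvTrail, pvDisp]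
  | cons c cs ih =>
    simp only [List.cons_append, pvTrail, pvDisp, ih, add_assoc]

theorem pvDisp_append (l r : List Char) :
    pvDisp (l ++ r) = ((pvDisp l).1 + (pvDisp r).1, (pvDisp l).2 + (pvDisp r).2) := by
  induction l with
  | nil => simp [pvDisp]
  | cons c cs ih => simp only [List.cons_append, pvDisp, ih, add_assoc]

-- merge rule: the trail of a concatenation from the origin is the left trail followed by
-- the right trail translated by the left displacement
theorem pv_trail_origin_append (l r : List Char) :
    pvTrail (0, 0) (l ++ r) =
      pvTrail (0, 0) l ++
        (pvTrail (0, 0) r).map (fun p => ((pvDisp l).1 + p.1, (pvDisp l).2 + p.2)) := by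
  rw [pv_trail_append]
  congr 1
  have h := pv_trail_shift r (pvDisp l) (0, 0)
  simpa using h

-- B's divide-and-conquer trail equals A's trail from the origin, paired with the displacement
theorem pvTrailBF_eq (f : Nat) (cs : List Char) (h : cs.length ≤ f) :
    pvTrailBF f cs = (pvTrail (0, 0) cs, pvDisp cs) := by
  induction f generalizing cs with
  | zero =>
    have : cs = [] := List.eq_nil_of_length_eq_zero (Nat.le_zero.mp h)
    subst this
    simp [pvTrailBF, pvTrail, pvDisp]
  | succ f ih =>
    match cs with
    | [] => simp [pvTrailBF, pvTrail, pvDisp]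
    | [c] => simp [pvTrailBF, pvTrail, pvDisp]
    | a :: b :: rest =>
      simp only [pvTrailBF]
      rw [ih _ (by simp only [List.length_take, List.length_cons] at *; omega),
          ih _ (by simp only [List.length_drop, List.length_cons] at *; omega)]
      conv_rhs => rw [← List.take_append_drop ((a :: b :: rest).length / 2) (a :: b :: rest)]
      rw [pv_trail_origin_append, pvDisp_append]

-- ===== VERDICT (by name: the statement is the Claim_ definition above) =====
theorem part_1_spec : Claim_equal_part_1 := by
  intro data _
  unfold Spec_part_1 part_1 part_1_alt
  rw [pv_foldA_eq]
  show PySem.Set.update _ _ =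
    PySem.Set.ofList (pvTrailBF (PySem.Str.join "" data).toList.length
      (PySem.Str.join "" data).toList).1
  rw [pvTrailBF_eq _ _ (Nat.le_refl _)]
  simp [PySem.Set.update, PySem.Set.ofList_eq_foldl, PySem.Set.empty]
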